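-- pv_equiv track=rewrite | github.com/kielejocain/cryptopals-python | cryptopals/cryptolib/convert.py | hex_from_64
-- ===== SOURCE A (Python) =====
-- def hex_from_64(b64str):
--     """Convert a base64 string to a hex string.
--
--     Keyword arguments:
--     b64str -- the base64 string we wish to convert
--     """
--     if b64str == '':
--         return ''
--
--     B64CHARS = 'ABCDEFGHIJKLMNOPQRSTUVWXYZabcdefghijklmnopqrstuvwxyz0123456789+/'
--     HEXCHARS = '0123456789abcdef'
--
--     ## internals
--     # bits contains the bits read off so far that don't make enough for a char
--     bits = 0
--     # bits_left tracks how many bits are left until a char is ready to convert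
--     bits_left = 4
--     # output hods the accrued hex string thus far
--     output = ''
--
--     # compute expected padding to validate at the end
--     padding = 0
--     unpadded_str = b64str
--     while unpadded_str[-1] == '=':
--         padding += 2
--         unpadded_str = unpadded_str[:-1]
--
--     for b in unpadded_str:
--         charbits = B64CHARS.find(b)
--         if charbits == -1:
--             err_msg = 'The given string was not base64-encoded: {}\nDue to char: {}'
--             raise ValueError(err_msg.format(b64str, b))
--         # if no bits carried over
--         if bits_left == 4:
--             # append the first four bits as a hex char
--             output += HEXCHARS[charbits >> 2]
--             # save the last two bits
--             bits = charbits & 3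
--             bits_left = 2
--         else:
--             # two bits are carried over; prepend them
--             charbits = (bits << 6) | charbits
--             output += HEXCHARS[charbits >> 4] + HEXCHARS[charbits & 15]
--             # clear the bit carring mechanism
--             bits = 0
--             bits_left = 4
--
--     # validate and trim if necessary
--     if padding == 4:
--         # there should be no bits carried,
--         # and the last char should be an unnecessary '0' from padding
--         if (bits_left == 2) or (output[-1] != '0'):
--             err_msg = 'The given string was not base64-encoded: {}\nPadding error'
--             raise ValueError(err_msg.format(b64str))
--         else:
--             output = output[:-1]
--     elif padding == 2:
--         # there should be two padding bits carried that are zeroes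
--         if (bits_left == 4) or (bits > 0):
--             err_msg = 'The given string was not base64-encoded: {}\nPadding error'
--             raise ValueError(err_msg.format(b64str))
--     else:
--         # there should be no carried bits
--         if bits_left == 2:
--             err_msg = 'The given string was not base64-encoded: {}\nPadding error'
--             raise ValueError(err_msg.format(b64str))
--
--     return output
-- ===== SOURCE B (Python) =====
-- def hex_from_64(b64str):
--     """Convert a base64 string to a hex string."""
--     if b64str == '':
--         return ''
--
--     B64CHARS = 'ABCDEFGHIJKLMNOPQRSTUVWXYZabcdefghijklmnopqrstuvwxyz0123456789+/'
--     HEXCHARS = '0123456789abcdef'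
--
--     # compute expected padding to validate at the end
--     padding = 0
--     unpadded_str = b64str
--     while unpadded_str[-1] == '=':
--         padding += 2
--         unpadded_str = unpadded_str[:-1]
--
--     # decode every char up front, validating as we go
--     vals = []
--     for b in unpadded_str:
--         v = B64CHARS.find(b)
--         if v == -1:
--             err_msg = 'The given string was not base64-encoded: {}\nDue to char: {}'
--             raise ValueError(err_msg.format(b64str, b))
--         vals.append(v)
--
--     # step over the values two at a time: each pair is 12 bits = 3 hex chars
--     out = []
--     i = 0
--     while i + 1 < len(vals):
--         v = (vals[i] << 6) | vals[i + 1]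
--         out.append(HEXCHARS[v >> 8])
--         out.append(HEXCHARS[(v >> 4) & 15])
--         out.append(HEXCHARS[v & 15])
--         i += 2
--     odd = i < len(vals)
--     low2 = 0
--     if odd:
--         out.append(HEXCHARS[vals[-1] >> 2])
--         low2 = vals[-1] & 3
--     output = ''.join(out)
--
--     # validate against the padding
--     err_msg = 'The given string was not base64-encoded: {}\nPadding error'
--     if padding == 4:
--         if odd or output[-1] != '0':
--             raise ValueError(err_msg.format(b64str))
--         output = output[:-1]
--     elif padding == 2:
--         if (not odd) or low2 > 0:
--             raise ValueError(err_msg.format(b64str))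
--     else:
--         if odd:
--             raise ValueError(err_msg.format(b64str))
--
--     return output
-- ===== Notes on version B (the rewrite author's own statement) =====
-- stated objective: alternative
-- what changed: Replaces A's per-character bits/bits_left carry state machine with a loop that consumes the unpadded string two base64 values at a time, turning each 12-bit pair directly into three hex chars, with a leftover-value odd flag and its low two bits driving the padding validation.
import Mathlib
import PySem

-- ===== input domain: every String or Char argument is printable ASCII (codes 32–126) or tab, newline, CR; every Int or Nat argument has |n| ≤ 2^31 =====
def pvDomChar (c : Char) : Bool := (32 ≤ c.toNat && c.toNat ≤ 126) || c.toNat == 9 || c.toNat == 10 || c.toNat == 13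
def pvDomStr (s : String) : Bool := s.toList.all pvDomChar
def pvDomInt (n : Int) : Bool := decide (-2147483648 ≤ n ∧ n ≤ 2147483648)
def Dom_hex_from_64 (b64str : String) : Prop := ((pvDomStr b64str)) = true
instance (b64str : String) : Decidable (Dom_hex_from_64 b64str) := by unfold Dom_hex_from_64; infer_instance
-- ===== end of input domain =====

-- B replaces A's per-char bits/bits_left state machine by a pair-at-a-time loop (12 bits -> 3 hex
-- chars) over pre-validated values; same return value wherever A returns (objective: alternative).

-- shared constants (both Pythons use the same literals)
def pvB64 : List Char := "ABCDEFGHIJKLMNOPQRSTUVWXYZabcdefghijklmnopqrstuvwxyz0123456789+/".toList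
def pvHEX : List Char := "0123456789abcdef".toList

-- HEXCHARS[i]; every index the ports use is in 0..15, so the default is never returned
def pvHexGet (i : Int) : Char := (PySem.List.pyGet? pvHEX i).getD '0'

-- B64CHARS.find(c)
def pvFindC (c : Char) : Int := PySem.Chars.find pvB64 [c]

-- the trailing-'=' stripping while-loop of both Pythons, on the reversed char list
def pvStrip : List Char → Nat → (List Char × Nat)
  | [], p => ([], p)
  | c :: rest, p => if c = '=' then pvStrip rest (p + 2) else (c :: rest, p)

-- ===== PORT A =====
-- A's for-loop: state (bits, bits_left, output); on an invalid char Python raises ValueError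
-- (excluded by Pre_), the port stops and returns the current state there.
def pvLoopA : List Char → Int → Int → List Char → (Int × Int × List Char)
  | [], bits, bl, out => (bits, bl, out)
  | c :: rest, bits, bl, out =>
    let charbits := pvFindC c
    if charbits = -1 then (bits, bl, out)  -- ValueError; excluded by Pre_
    else if bl = 4 then
      pvLoopA rest (PySem.Int.band charbits 3) 2 (out ++ [pvHexGet (charbits >>> (2:Nat))])
    else
      let cb := PySem.Int.bor (bits <<< (6:Nat)) charbits
      pvLoopA rest 0 4 (out ++ [pvHexGet (cb >>> (4:Nat)), pvHexGet (PySem.Int.band cb 15)])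

def hex_from_64 (b64str : String) : String :=
  if b64str = "" then "" else
  let sp := pvStrip b64str.toList.reverse 0
  let unpadded := sp.1.reverse
  let padding := sp.2
  let st := pvLoopA unpadded 0 4 []
  let bits := st.1
  let bits_left := st.2.1
  let output := st.2.2
  if padding = 4 then
    -- Python raises ValueError (or IndexError on empty output) in the error branch; excluded by Pre_
    if bits_left = 2 ∨ PySem.List.pyGet? output (-1) ≠ some '0' then ""
    else String.ofList output.dropLast
  else if padding = 2 then
    if bits_left = 4 ∨ bits > 0 then "" else String.ofList output  -- error branch excluded by Pre_
  else
    if bits_left = 2 then "" else String.ofList output  -- error branch excluded by Pre_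

-- ===== PORT B =====
-- B's while-loop: two values -> twelve bits -> three hex chars; a leftover value sets odd/low2.
def pvLoopB : List Int → List Char → (List Char × Bool × Int)
  | v1 :: v2 :: rest, out =>
    let v := PySem.Int.bor (v1 <<< (6:Nat)) v2
    pvLoopB rest (out ++ [pvHexGet (v >>> (8:Nat)), pvHexGet (PySem.Int.band (v >>> (4:Nat)) 15), pvHexGet (PySem.Int.band v 15)])
  | [v], out => (out ++ [pvHexGet (v >>> (2:Nat))], true, PySem.Int.band v 3)
  | [], out => (out, false, 0)

def hex_from_64_alt (b64str : String) : String :=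
  if b64str = "" then "" else
  let sp := pvStrip b64str.toList.reverse 0
  let unpadded := sp.1.reverse
  let padding := sp.2
  let vals := unpadded.map pvFindC
  if (-1 : Int) ∈ vals then ""  -- ValueError while building vals; excluded by Pre_
  else
  let r := pvLoopB vals []
  let output := r.1
  let odd := r.2.1
  let low2 := r.2.2
  if padding = 4 then
    if odd = true ∨ PySem.List.pyGet? output (-1) ≠ some '0' then ""  -- error branch excluded by Pre_
    else String.ofList output.dropLast
  else if padding = 2 then
    if odd = false ∨ low2 > 0 then "" else String.ofList output  -- error branch excluded by Pre_
  else
    if odd = true then "" else String.ofList output  -- error branch excluded by Pre_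

-- ===== PRECONDITION & SPEC =====
-- Pre_ is exactly the set of inputs on which the Python A returns; everywhere else A raises
-- (ValueError on a non-base64 char or a padding mismatch, IndexError on an all-'=' string).
def Pre_hex_from_64 (b64str : String) : Prop :=
  b64str = "" ∨
  (let l := b64str.toList
   let u := (l.reverse.dropWhile (fun c => c = '=')).reverse
   let p := 2 * (l.reverse.takeWhile (fun c => c = '=')).length
   u ≠ [] ∧ (u.all (fun c => pvB64.contains c)) = true ∧
   (if p = 4 then u.length % 2 = 0 ∧ PySem.Int.mod (pvFindC (u.getLastD 'A')) 16 = 0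
    else if p = 2 then u.length % 2 = 1 ∧ PySem.Int.mod (pvFindC (u.getLastD 'A')) 4 = 0
    else u.length % 2 = 0))
instance (b64str : String) : Decidable (Pre_hex_from_64 b64str) := by unfold Pre_hex_from_64; infer_instance

def pvWitness_hex_from_64 : String := "TWFu"

def Spec_hex_from_64 (b64str : String) (out : String) : Prop := out = hex_from_64_alt b64str
instance (b64str : String) (out : String) : Decidable (Spec_hex_from_64 b64str out) := by unfold Spec_hex_from_64; infer_instance

-- ===== CLAIM (what is proved, stated in full; the proofs are below) =====
def Claim_equal_hex_from_64 : Prop := ∀ (b64str : String), Dom_hex_from_64 b64str → Pre_hex_from_64 b64str → Spec_hex_from_64 b64str (hex_from_64 b64str)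

-- ===== LEMMAS AND PROOFS =====

-- the strip loop computes dropWhile/takeWhile on the reversed list
lemma pvStrip_eq (r : List Char) (p : Nat) :
    pvStrip r p = (r.dropWhile (fun c => c = '='), p + 2 * (r.takeWhile (fun c => c = '=')).length) := by
  induction r generalizing p with
  | nil => simp [pvStrip]
  | cons c rest ih =>
    by_cases h : c = '='
    · simp [pvStrip, h, List.dropWhile, List.takeWhile, ih]; ring
    · simp [pvStrip, h, List.dropWhile, List.takeWhile]

lemma pvFindC_all : (pvB64.all (fun c => decide (0 ≤ pvFindC c ∧ pvFindC c < 64))) = true := by rfl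

-- every character of B64CHARS decodes to a value in 0..63
lemma pvFindC_lt (c : Char) (h : c ∈ pvB64) : 0 ≤ pvFindC c ∧ pvFindC c < 64 :=
  of_decide_eq_true (List.all_eq_true.mp pvFindC_all c h)

lemma pair_nibbles_all : ((List.range 64).all (fun a => (List.range 64).all (fun b =>
    decide ((a <<< 6 ||| b) >>> 8 = a >>> 2 ∧
    (((a &&& 3) <<< 6 ||| b) >>> 4 = ((a <<< 6 ||| b) >>> 4) &&& 15) ∧
    (((a &&& 3) <<< 6 ||| b) &&& 15 = (a <<< 6 ||| b) &&& 15))))) = true := by rfl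

-- the three hex nibbles of a 12-bit pair, on Nat
lemma pair_nibbles (a b : Nat) (ha : a < 64) (hb : b < 64) :
    (a <<< 6 ||| b) >>> 8 = a >>> 2 ∧
    (((a &&& 3) <<< 6 ||| b) >>> 4 = ((a <<< 6 ||| b) >>> 4) &&& 15) ∧
    (((a &&& 3) <<< 6 ||| b) &&& 15 = (a <<< 6 ||| b) &&& 15) := by
  have h := List.all_eq_true.mp pair_nibbles_all a (List.mem_range.mpr ha)
  exact of_decide_eq_true (List.all_eq_true.mp h b (List.mem_range.mpr hb))

-- core: A's state machine started fresh equals B's pair loop on the decoded values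
lemma loop_agree : ∀ (cs : List Char) (out : List Char), (∀ c ∈ cs, c ∈ pvB64) →
    pvLoopA cs 0 4 out =
      ((pvLoopB (cs.map pvFindC) out).2.2,
       (if (pvLoopB (cs.map pvFindC) out).2.1 then 2 else 4),
       (pvLoopB (cs.map pvFindC) out).1)
  | [], out, _ => by simp [pvLoopA, pvLoopB]
  | [c], out, h => by
    have hc := pvFindC_lt c (h c (by simp))
    have hne : pvFindC c ≠ -1 := by omega
    simp [pvLoopA, pvLoopB, hne]
  | c1 :: c2 :: rest, out, h => by
    have h1 := pvFindC_lt c1 (h c1 (by simp))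
    have h2 := pvFindC_lt c2 (h c2 (by simp))
    have hne1 : pvFindC c1 ≠ -1 := by omega
    have hne2 : pvFindC c2 ≠ -1 := by omega
    obtain ⟨m1, hm1⟩ : ∃ m : Nat, pvFindC c1 = (m : Int) := ⟨(pvFindC c1).toNat, by omega⟩
    obtain ⟨m2, hm2⟩ : ∃ m : Nat, pvFindC c2 = (m : Int) := ⟨(pvFindC c2).toNat, by omega⟩
    have l1 : m1 < 64 := by omega
    have l2 : m2 < 64 := by omega
    obtain ⟨n1, n2, n3⟩ := pair_nibbles m1 m2 l1 l2
    have c3e : (3:Int) = ((3:Nat):Int) := rfl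
    have c15e : (15:Int) = ((15:Nat):Int) := rfl
    have E1 : pvFindC c1 >>> (2:Nat) = PySem.Int.bor (pvFindC c1 <<< (6:Nat)) (pvFindC c2) >>> (8:Nat) := by
      rw [hm1, hm2]
      simp only [← Int.natCast_shiftLeft, ← Int.natCast_shiftRight, PySem.Int.bor_natCast,
        Nat.cast_inj]
      exact n1.symm
    have E2 : PySem.Int.bor ((PySem.Int.band (pvFindC c1) 3) <<< (6:Nat)) (pvFindC c2) >>> (4:Nat)
        = PySem.Int.band ((PySem.Int.bor (pvFindC c1 <<< (6:Nat)) (pvFindC c2)) >>> (4:Nat)) 15 := by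
      rw [hm1, hm2, c3e, c15e]
      simp only [← Int.natCast_shiftLeft, ← Int.natCast_shiftRight, PySem.Int.bor_natCast,
        PySem.Int.band_natCast, Nat.cast_inj]
      exact n2
    have E3 : PySem.Int.band (PySem.Int.bor ((PySem.Int.band (pvFindC c1) 3) <<< (6:Nat)) (pvFindC c2)) 15
        = PySem.Int.band (PySem.Int.bor (pvFindC c1 <<< (6:Nat)) (pvFindC c2)) 15 := by
      rw [hm1, hm2, c3e, c15e]
      simp only [← Int.natCast_shiftLeft, PySem.Int.bor_natCast,
        PySem.Int.band_natCast, Nat.cast_inj]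
      exact n3
    have ih := loop_agree rest
      (out ++ [pvHexGet ((PySem.Int.bor (pvFindC c1 <<< (6:Nat)) (pvFindC c2)) >>> (8:Nat)),
        pvHexGet (PySem.Int.band ((PySem.Int.bor (pvFindC c1 <<< (6:Nat)) (pvFindC c2)) >>> (4:Nat)) 15),
        pvHexGet (PySem.Int.band (PySem.Int.bor (pvFindC c1 <<< (6:Nat)) (pvFindC c2)) 15)])
      (fun c hc => h c (by simp [hc]))
    simp only [pvLoopA, pvLoopB, hne1, hne2, List.map_cons, if_false, reduceIte]
    norm_num
    rw [E1, E2, E3]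
    simpa [List.append_assoc] using ih

-- a valid character never decodes to -1
lemma no_neg_one (u : List Char) (h : ∀ c ∈ u, c ∈ pvB64) : (-1 : Int) ∉ u.map pvFindC := by
  intro hm
  obtain ⟨c, hc, he⟩ := List.mem_map.mp hm
  have := pvFindC_lt c (h c hc)
  omega

-- ===== VERDICT (by name: the statement is the Claim_ definition above) =====
theorem hex_from_64_spec : Claim_equal_hex_from_64 := by
  intro s _ hpre
  unfold Spec_hex_from_64 hex_from_64 hex_from_64_alt
  by_cases hs : s = ""
  · simp [hs]
  · simp only [hs, if_false]
    rcases hpre with h0 | hpre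
    · exact absurd h0 hs
    obtain ⟨-, hvalid, -⟩ := hpre
    rw [pvStrip_eq]
    have hvalid' : ∀ c ∈ (s.toList.reverse.dropWhile (fun c => c = '=')).reverse, c ∈ pvB64 := by
      intro c hc
      simpa using List.all_eq_true.mp hvalid c hc
    rw [loop_agree _ [] hvalid']
    simp only [no_neg_one _ hvalid', if_false]
    cases hob : (pvLoopB ((s.toList.reverse.dropWhile (fun c => c = '=')).reverse.map pvFindC) []).2.1 <;>
      simp
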